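-- pv_equiv track=rewrite | github.com/Artificial-Intelligence-BNUT/assistant-Bot-Rescuing-Charger | 40030112048.py | found_batry
-- ===== SOURCE A (Python) =====
-- def found_batry(N,input_array):
--     action = []
--     robot = None
--     battery = None
--
--     for i in range(N):
--         for j in range(N):
--             if input_array[i][j] == 'b':
--                 robot = (i, j)
--             elif input_array[i][j] == 'c':
--                 battery = (i, j)
--
--     while robot != battery:
--         if robot[0] < battery[0]:
--             action.append('DOWN')
--             robot = (robot[0]+1, robot[1])
--         elif robot[0] > battery[0]:
--             action.append('UP')
--             robot = (robot[0]-1, robot[1])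
--         elif robot[1] < battery[1]:
--             action.append('RIGHT')
--             robot = (robot[0], robot[1]+1)
--         else:
--             action.append('LEFT')
--             robot = (robot[0], robot[1]-1)
--
--     return action
-- ===== SOURCE B (Python) =====
-- def found_batry(N, input_array):
--     robot = None
--     battery = None
--     for i in range(N):
--         for j in range(N):
--             cell = input_array[i][j]
--             if cell == 'b':
--                 robot = (i, j)
--             elif cell == 'c':
--                 battery = (i, j)
--     if robot is None and battery is None:
--         return []
--     dr = battery[0] - robot[0]
--     dc = battery[1] - robot[1]
--     vertical = ['DOWN'] * dr if dr > 0 else ['UP'] * (-dr)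
--     horizontal = ['RIGHT'] * dc if dc > 0 else ['LEFT'] * (-dc)
--     return vertical + horizontal
-- ===== Notes on version B (the rewrite author's own statement) =====
-- stated objective: simpler
-- what changed: The step-by-step while loop walking the robot one cell at a time is replaced by a closed form: compute the row/column deltas once and emit the vertical block of moves followed by the horizontal block via list repetition.
import Mathlib
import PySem

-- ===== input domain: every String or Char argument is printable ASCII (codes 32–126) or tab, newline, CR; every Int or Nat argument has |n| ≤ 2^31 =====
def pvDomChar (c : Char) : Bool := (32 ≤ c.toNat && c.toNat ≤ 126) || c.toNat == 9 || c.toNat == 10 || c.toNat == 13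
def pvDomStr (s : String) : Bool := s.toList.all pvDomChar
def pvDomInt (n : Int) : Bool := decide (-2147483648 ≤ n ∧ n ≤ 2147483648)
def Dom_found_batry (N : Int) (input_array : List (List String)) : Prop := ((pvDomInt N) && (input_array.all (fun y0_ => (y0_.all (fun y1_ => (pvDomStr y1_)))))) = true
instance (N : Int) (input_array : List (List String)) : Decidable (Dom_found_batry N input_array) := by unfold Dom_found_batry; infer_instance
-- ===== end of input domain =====

-- B replaces A's one-cell-at-a-time while loop by a closed-form move list (vertical block then
-- horizontal block via repetition); objective: simpler. Equivalence is about the return value.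

-- ===== PORT A =====
-- the double for-loop locating the last 'b' and last 'c' (input_array[i][j]; in range under Pre_)
def pvScanA (N : Int) (input_array : List (List String)) :
    Option (Int × Int) × Option (Int × Int) :=
  (PySem.List.pyRange 0 N 1).foldl (fun st i =>
    (PySem.List.pyRange 0 N 1).foldl (fun st j =>
      if PySem.List.pyGetD (PySem.List.pyGetD input_array i []) j "" = "b" then (some (i, j), st.2)
      else if PySem.List.pyGetD (PySem.List.pyGetD input_array i []) j "" = "c" then (st.1, some (i, j))
      else st) st) (none, none)

-- the while loop, step for step ('while robot != battery: …'); output accumulated front-to-back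
def pvLoopA (r1 r2 b1 b2 : Int) : List String :=
  if r1 = b1 ∧ r2 = b2 then []
  else if r1 < b1 then "DOWN" :: pvLoopA (r1 + 1) r2 b1 b2
  else if r1 > b1 then "UP" :: pvLoopA (r1 - 1) r2 b1 b2
  else if r2 < b2 then "RIGHT" :: pvLoopA r1 (r2 + 1) b1 b2
  else "LEFT" :: pvLoopA r1 (r2 - 1) b1 b2
termination_by ((b1 - r1).natAbs + (b2 - r2).natAbs)
decreasing_by all_goals omega

def found_batry (N : Int) (input_array : List (List String)) : List String :=
  match pvScanA N input_array with
  | (none, none) => []                         -- robot == battery: while loop body never runs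
  | (some r, some b) => pvLoopA r.1 r.2 b.1 b.2
  | _ => []                                    -- Python raises TypeError here; excluded by Pre_

-- ===== PORT B =====
-- same locating scan as Source B's double loop
def pvScanB (N : Int) (input_array : List (List String)) :
    Option (Int × Int) × Option (Int × Int) :=
  (PySem.List.pyRange 0 N 1).foldl (fun st i =>
    (PySem.List.pyRange 0 N 1).foldl (fun st j =>
      let cell := PySem.List.pyGetD (PySem.List.pyGetD input_array i []) j ""
      if cell = "b" then (some (i, j), st.2)
      else if cell = "c" then (st.1, some (i, j))
      else st) st) (none, none)

-- closed-form path: vertical block then horizontal block, by repetition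
def pvMovesB (r1 r2 b1 b2 : Int) : List String :=
  (if b1 - r1 > 0 then List.replicate (b1 - r1).toNat "DOWN"
   else List.replicate (-(b1 - r1)).toNat "UP") ++
  (if b2 - r2 > 0 then List.replicate (b2 - r2).toNat "RIGHT"
   else List.replicate (-(b2 - r2)).toNat "LEFT")

def found_batry_alt (N : Int) (input_array : List (List String)) : List String :=
  let rb := pvScanB N input_array
  match rb.1 with
  | none =>
    match rb.2 with
    | none => []                               -- 'if robot is None and battery is None: return []'
    | some _ => []                             -- Python raises TypeError here; excluded by Pre_
  | some r =>
    match rb.2 with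
    | none => []                               -- Python raises TypeError here; excluded by Pre_
    | some b => pvMovesB r.1 r.2 b.1 b.2

-- ===== PRECONDITION & SPEC =====
-- Pre_ excludes exactly the inputs where Python A raises: an out-of-range access in the N×N scan
-- (IndexError) and grids where exactly one of 'b'/'c' occurs in the scanned region, on which the
-- while loop subscripts None (TypeError).
def Pre_found_batry (N : Int) (input_array : List (List String)) : Prop :=
  (0 < N → N ≤ input_array.length ∧
    ∀ row ∈ input_array.take N.toNat, N ≤ row.length) ∧
  ((∃ row ∈ input_array.take N.toNat, "b" ∈ row.take N.toNat) ↔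
   (∃ row ∈ input_array.take N.toNat, "c" ∈ row.take N.toNat))
instance (N : Int) (input_array : List (List String)) : Decidable (Pre_found_batry N input_array) := by
  unfold Pre_found_batry; infer_instance

def pvWitness_found_batry : Int × List (List String) := (2, [["b", "."], [".", "c"]])

def Spec_found_batry (N : Int) (input_array : List (List String)) (out : List String) : Prop := out = found_batry_alt N input_array
instance (N : Int) (input_array : List (List String)) (out : List String) : Decidable (Spec_found_batry N input_array out) := by unfold Spec_found_batry; infer_instance

-- ===== CLAIM (what is proved, stated in full; the proofs are below) =====
def Claim_equal_found_batry : Prop := ∀ (N : Int) (input_array : List (List String)), Dom_found_batry N input_array → Pre_found_batry N input_array → Spec_found_batry N input_array (found_batry N input_array)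

-- ===== LEMMAS AND PROOFS =====

theorem pvScan_eq (N : Int) (input_array : List (List String)) :
    pvScanA N input_array = pvScanB N input_array := rfl

theorem pvLoop_eq_moves (r1 r2 b1 b2 : Int) :
    pvLoopA r1 r2 b1 b2 = pvMovesB r1 r2 b1 b2 := by
  fun_induction pvLoopA r1 r2 b1 b2 with
  | case1 r1 r2 h =>
      obtain ⟨h1, h2⟩ := h
      subst h1; subst h2
      simp [pvMovesB]
  | case2 r1 r2 h hlt ih =>
      rw [ih]
      unfold pvMovesB
      have h1 : b1 - r1 > 0 := by omega
      have hstep : (b1 - r1).toNat = (b1 - (r1 + 1)).toNat + 1 := by omega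
      simp only [if_pos h1, hstep, List.replicate_succ]
      by_cases hc : b1 - (r1 + 1) > 0
      · simp only [if_pos hc, List.cons_append]
      · have hz : (b1 - (r1 + 1)).toNat = 0 := by omega
        have hz2 : (-(b1 - (r1 + 1))).toNat = 0 := by omega
        simp only [if_neg hc, hz, hz2, List.replicate_zero, List.cons_append]
  | case3 r1 r2 h h1 hgt ih =>
      rw [ih]
      unfold pvMovesB
      have hle : ¬ (b1 - r1 > 0) := by omega
      have hle' : ¬ (b1 - (r1 - 1) > 0) := by omega
      simp only [if_neg hle, if_neg hle']
      have hstep : (-(b1 - r1)).toNat = (-(b1 - (r1 - 1))).toNat + 1 := by omega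
      rw [hstep, List.replicate_succ]
      simp
  | case4 r1 r2 h h1 h2 hlt ih =>
      rw [ih]
      unfold pvMovesB
      have he : ¬ (b1 - r1 > 0) := by omega
      have hz : (-(b1 - r1)).toNat = 0 := by omega
      have hc : b2 - r2 > 0 := by omega
      have hstep : (b2 - r2).toNat = (b2 - (r2 + 1)).toNat + 1 := by omega
      simp only [if_neg he, hz, List.replicate_zero, if_pos hc, hstep, List.replicate_succ,
        List.nil_append]
      by_cases hc2 : b2 - (r2 + 1) > 0
      · simp only [if_pos hc2]
      · have hz1 : (b2 - (r2 + 1)).toNat = 0 := by omega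
        have hz2 : (-(b2 - (r2 + 1))).toNat = 0 := by omega
        simp only [if_neg hc2, hz1, hz2, List.replicate_zero]
  | case5 r1 r2 h h1 h2 h3 ih =>
      rw [ih]
      unfold pvMovesB
      have he : ¬ (b1 - r1 > 0) := by omega
      have hz : (-(b1 - r1)).toNat = 0 := by omega
      have hc : ¬ (b2 - r2 > 0) := by omega
      have hc' : ¬ (b2 - (r2 - 1) > 0) := by omega
      have hstep : (-(b2 - r2)).toNat = (-(b2 - (r2 - 1))).toNat + 1 := by omega
      simp only [if_neg he, hz, List.replicate_zero, if_neg hc, if_neg hc', hstep,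
        List.replicate_succ, List.nil_append]

-- ===== VERDICT (by name: the statement is the Claim_ definition above) =====
theorem found_batry_spec : Claim_equal_found_batry := by
  intro N input_array _ _
  unfold Spec_found_batry found_batry found_batry_alt
  rw [pvScan_eq]
  rcases pvScanB N input_array with ⟨(_ | r), (_ | b)⟩ <;> simp [pvLoop_eq_moves]
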